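-- pv_equiv track=rewrite | github.com/bioinfo-chru-strasbourg/howard | howard/objects/database.py | get_needed_columns
-- ===== SOURCE A (Python) =====
-- DATABASE_TYPE_NEEDED_COLUMNS = {
--     "variants": {
--         "#CHROM": ["#CHROM", "CHROM", "CHR", "CHROMOSOME"],
--         "POS": ["POS"],
--         "REF": ["REF"],
--         "ALT": ["ALT"],
--     },
--     "regions": {
--         "#CHROM": ["#CHROM", "CHROM", "CHR", "CHROMOSOME"],
--         "START": ["START", "POSITIONSTART", "POS"],
--         "END": ["END", "POSITIONEND", "POS"],
--     },
--     "vcf": {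
--         "#CHROM": ["#CHROM", "CHROM", "CHR", "CHROMOSOME"],
--         "POS": ["POS", "POSITION"],
--         "ID": ["ID", "IDENTIFIER"],
--         "REF": ["REF", "REFERENCE"],
--         "ALT": ["ALT", "ALTERNATIVE"],
--         "QUAL": ["QUAL", "QUALITY"],
--         "FILTER": ["FILTER"],
--         "INFO": ["INFO"],
--     },
--     "bed": {
--         "#CHROM": ["#CHROM", "CHROM", "CHR", "CHROMOSOME"],
--         "START": ["START", "POSITIONSTART", "POS"],
--         "END": ["END", "POSITIONEND", "POS"],
--     },
-- }
--
-- def get_needed_columns(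
--     database_columns: list = [], database_type: str = None
-- ) -> dict:
--     """
--     This function takes a list of database columns and a type, and returns a dictionary of needed
--     columns and their corresponding values found in the database columns.
--
--     :param database_columns: A list of column names in a database table
--     :type database_columns: list
--     :param type: The type of database being used. It is used to determine which columns are needed
--     for the specific database type
--     :type type: str
--     :return: a dictionary containing the columns that are needed for a specific database type, along
--     with their corresponding column names in the actual database. The function takes in a list of
--     database columns and a database type as input, and uses the `DATABASE_TYPE_NEEDED_COLUMNS`
--     dictionary to determine which columns are needed for the specified database type. It then
--     searches through the list of database columns to find the
--     """
--
--     needed_columns = DATABASE_TYPE_NEEDED_COLUMNS.get(database_type)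
--     variants_columns_found = {}
--
--     if needed_columns:
--         for needed_col in needed_columns:
--             variants_columns_found[needed_col] = None
--             for possible_col in needed_columns[needed_col]:
--                 if database_columns:
--                     for existing_column in database_columns:
--                         if possible_col.upper() == existing_column.upper():
--                             variants_columns_found[needed_col] = existing_column
--                             break
--
--     return variants_columns_found
-- ===== SOURCE B (Python) =====
-- DATABASE_TYPE_NEEDED_COLUMNS = {
--     "variants": {
--         "#CHROM": ["#CHROM", "CHROM", "CHR", "CHROMOSOME"],
--         "POS": ["POS"],
--         "REF": ["REF"],
--         "ALT": ["ALT"],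
--     },
--     "regions": {
--         "#CHROM": ["#CHROM", "CHROM", "CHR", "CHROMOSOME"],
--         "START": ["START", "POSITIONSTART", "POS"],
--         "END": ["END", "POSITIONEND", "POS"],
--     },
--     "vcf": {
--         "#CHROM": ["#CHROM", "CHROM", "CHR", "CHROMOSOME"],
--         "POS": ["POS", "POSITION"],
--         "ID": ["ID", "IDENTIFIER"],
--         "REF": ["REF", "REFERENCE"],
--         "ALT": ["ALT", "ALTERNATIVE"],
--         "QUAL": ["QUAL", "QUALITY"],
--         "FILTER": ["FILTER"],
--         "INFO": ["INFO"],
--     },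
--     "bed": {
--         "#CHROM": ["#CHROM", "CHROM", "CHR", "CHROMOSOME"],
--         "START": ["START", "POSITIONSTART", "POS"],
--         "END": ["END", "POSITIONEND", "POS"],
--     },
-- }
--
--
-- def get_needed_columns(database_columns: list = [], database_type: str = None) -> dict:
--     # Build once: uppercased column name -> first database column with that spelling.
--     needed_columns = DATABASE_TYPE_NEEDED_COLUMNS.get(database_type)
--     if not needed_columns:
--         return {}
--     first_by_upper = {}
--     for col in database_columns:
--         first_by_upper.setdefault(col.upper(), col)
--     result = {}
--     for needed_col, aliases in needed_columns.items():
--         found = None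
--         # A keeps the match of the last alias that occurs: scan aliases backwards.
--         for alias in reversed(aliases):
--             hit = first_by_upper.get(alias.upper())
--             if hit is not None:
--                 found = hit
--                 break
--         result[needed_col] = found
--     return result
-- ===== Notes on version B (the rewrite author's own statement) =====
-- stated objective: alternative
-- what changed: Instead of rescanning the whole column list for every alias of every needed column, B builds one uppercase->first-column dict from database_columns and then resolves each needed column by a backwards scan of its alias list with O(1) lookups (last-alias-wins becomes first-match-from-the-back).
import Mathlib
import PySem

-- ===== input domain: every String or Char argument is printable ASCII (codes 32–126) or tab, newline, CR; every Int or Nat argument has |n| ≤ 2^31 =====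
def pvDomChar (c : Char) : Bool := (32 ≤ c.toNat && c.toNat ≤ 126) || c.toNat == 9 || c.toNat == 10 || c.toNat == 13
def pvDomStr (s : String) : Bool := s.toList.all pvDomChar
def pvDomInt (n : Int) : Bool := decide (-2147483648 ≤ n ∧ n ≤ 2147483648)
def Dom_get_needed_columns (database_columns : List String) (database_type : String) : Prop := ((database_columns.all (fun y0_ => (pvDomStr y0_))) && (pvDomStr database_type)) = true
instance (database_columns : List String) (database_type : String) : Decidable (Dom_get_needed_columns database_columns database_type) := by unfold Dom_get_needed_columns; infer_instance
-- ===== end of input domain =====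

-- B replaces A's per-alias scan of all database columns by one precomputed
-- uppercase→first-column map plus a backwards alias scan (alternative algorithm).

-- Shared module constant DATABASE_TYPE_NEEDED_COLUMNS, as `.get database_type`
def pvTable (database_type : String) : Option (List (String × List String)) :=
  if database_type = "variants" then
    some [("#CHROM", ["#CHROM", "CHROM", "CHR", "CHROMOSOME"]),
          ("POS", ["POS"]), ("REF", ["REF"]), ("ALT", ["ALT"])]
  else if database_type = "regions" then
    some [("#CHROM", ["#CHROM", "CHROM", "CHR", "CHROMOSOME"]),
          ("START", ["START", "POSITIONSTART", "POS"]),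
          ("END", ["END", "POSITIONEND", "POS"])]
  else if database_type = "vcf" then
    some [("#CHROM", ["#CHROM", "CHROM", "CHR", "CHROMOSOME"]),
          ("POS", ["POS", "POSITION"]), ("ID", ["ID", "IDENTIFIER"]),
          ("REF", ["REF", "REFERENCE"]), ("ALT", ["ALT", "ALTERNATIVE"]),
          ("QUAL", ["QUAL", "QUALITY"]), ("FILTER", ["FILTER"]), ("INFO", ["INFO"])]
  else if database_type = "bed" then
    some [("#CHROM", ["#CHROM", "CHROM", "CHR", "CHROMOSOME"]),
          ("START", ["START", "POSITIONSTART", "POS"]),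
          ("END", ["END", "POSITIONEND", "POS"])]
  else none

-- ===== PORT A =====
-- A's inner `for existing_column in database_columns: … break`
def pvAColLoop (cols : List String) (possible : String) : Option String :=
  match cols with
  | [] => none
  | c :: rest =>
      if PySem.Str.upper possible = PySem.Str.upper c then some c
      else pvAColLoop rest possible

-- A's `for possible_col in needed_columns[needed_col]` body (dict threaded through)
def pvAEntry (cols : List String) (k : String) (aliases : List String)
    (d : PySem.Dict String (Option String)) : PySem.Dict String (Option String) :=
  aliases.foldl (fun d p =>
    if cols ≠ [] then
      match pvAColLoop cols p with
      | some c => d.insert k (some c)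
      | none => d
    else d) (d.insert k none)

def get_needed_columns (database_columns : List String) (database_type : String) :
    List (String × Option String) :=
  match pvTable database_type with
  | none => []
  | some needed =>
      (needed.foldl (fun d kv => pvAEntry database_columns kv.1 kv.2 d)
        PySem.Dict.empty).items

-- ===== PORT B =====
-- first_by_upper: uppercased column name -> first database column with that spelling
def pvFirstByUpper (cols : List String) : PySem.Dict String String :=
  cols.foldl (fun m c => m.setdefault (PySem.Str.upper c) c) PySem.Dict.empty

-- `for alias in reversed(aliases): … break` (argument already reversed)
def pvBFind (m : PySem.Dict String String) (revAliases : List String) : Option String :=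
  match revAliases with
  | [] => none
  | a :: rest =>
      match m.get? (PySem.Str.upper a) with
      | some c => some c
      | none => pvBFind m rest

def get_needed_columns_alt (database_columns : List String) (database_type : String) :
    List (String × Option String) :=
  match pvTable database_type with
  | none => []
  | some needed =>
      let m := pvFirstByUpper database_columns
      (needed.foldl (fun d kv => d.insert kv.1 (pvBFind m kv.2.reverse))
        PySem.Dict.empty).items

-- ===== PRECONDITION & SPEC =====
def Spec_get_needed_columns (database_columns : List String) (database_type : String) (out : List (String × Option String)) : Prop := out = get_needed_columns_alt database_columns database_type
instance (database_columns : List String) (database_type : String) (out : List (String × Option String)) : Decidable (Spec_get_needed_columns database_columns database_type out) := by unfold Spec_get_needed_columns; infer_instance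

-- ===== CLAIM (what is proved, stated in full; the proofs are below) =====
def Claim_equal_get_needed_columns : Prop := ∀ (database_columns : List String) (database_type : String), Dom_get_needed_columns database_columns database_type → Spec_get_needed_columns database_columns database_type (get_needed_columns database_columns database_type)

-- ===== LEMMAS AND PROOFS =====

-- the lookup map answers exactly A's first-match scan
theorem pv_fbu_get (cols : List String) (m : PySem.Dict String String) (p : String) :
    (cols.foldl (fun m c => m.setdefault (PySem.Str.upper c) c) m).get?
        (PySem.Str.upper p)
      = (m.get? (PySem.Str.upper p)).or (pvAColLoop cols p) := by
  induction cols generalizing m with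
  | nil => simp [pvAColLoop]
  | cons c rest ih =>
      simp only [List.foldl_cons, ih]
      by_cases hc : m.contains (PySem.Str.upper c) = true
      · rw [PySem.Dict.setdefault_of_contains _ _ hc]
        by_cases he : PySem.Str.upper p = PySem.Str.upper c
        · have : (m.get? (PySem.Str.upper p)).isSome := by
            rw [he]
            rw [PySem.Dict.contains_eq_isSome_get?] at hc
            exact hc
          obtain ⟨v, hv⟩ := Option.isSome_iff_exists.mp this
          have hv' : m.get? (PySem.Str.upper c) = some v := he ▸ hv
          simp [pvAColLoop, he, hv', Option.or]
        · simp [pvAColLoop, he]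
      · rw [PySem.Dict.setdefault_of_not_contains _ _ (by simpa using hc)]
        have hn : m.get? (PySem.Str.upper c) = none := by
          rw [PySem.Dict.contains_eq_isSome_get?] at hc
          simpa using hc
        by_cases he : PySem.Str.upper p = PySem.Str.upper c
        · rw [he, PySem.Dict.get?_insert_self, hn]
          simp [pvAColLoop, he, Option.or]
        · rw [PySem.Dict.get?_insert_of_ne _ _ he]
          simp [pvAColLoop, he]

theorem pv_fbu_get' (cols : List String) (p : String) :
    (pvFirstByUpper cols).get? (PySem.Str.upper p) = pvAColLoop cols p := by
  unfold pvFirstByUpper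
  rw [pv_fbu_get]
  simp [Option.or]

theorem pv_bfind_append (m : PySem.Dict String String) (l1 l2 : List String) :
    pvBFind m (l1 ++ l2) = (pvBFind m l1).or (pvBFind m l2) := by
  induction l1 with
  | nil => simp [pvBFind]
  | cons a rest ih =>
      simp only [List.cons_append, pvBFind, ih]
      cases m.get? (PySem.Str.upper a) <;> simp [Option.or]

-- A's last-alias-wins loop value = B's backwards first-match scan
theorem pv_alias_loop (cols : List String) (aliases : List String)
    (acc : Option String) :
    aliases.foldl (fun a p =>
        if cols ≠ [] then
          match pvAColLoop cols p with
          | some c => some c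
          | none => a
        else a) acc
      = (pvBFind (pvFirstByUpper cols) aliases.reverse).or acc := by
  induction aliases generalizing acc with
  | nil => simp [pvBFind]
  | cons p rest ih =>
      simp only [List.foldl_cons, List.reverse_cons, ih, pv_bfind_append]
      have h1 : pvBFind (pvFirstByUpper cols) [p] = pvAColLoop cols p := by
        simp only [pvBFind, pv_fbu_get']
        cases pvAColLoop cols p <;> rfl
      have h2 : (if cols ≠ [] then
          match pvAColLoop cols p with
          | some c => some c
          | none => acc
          else acc) = (pvAColLoop cols p).or acc := by
        by_cases hc : cols = []
        · subst hc; simp [pvAColLoop, Option.or]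
        · simp only [hc, ne_eq, not_false_eq_true, if_true]
          cases pvAColLoop cols p <;> rfl
      rw [h1, h2, Option.or_assoc]

-- writing `k := None` then conditionally overwriting k = one insert of the loop value
theorem pv_entry_eq (cols : List String) (k : String) (aliases : List String)
    (d : PySem.Dict String (Option String)) :
    pvAEntry cols k aliases d
      = d.insert k (pvBFind (pvFirstByUpper cols) aliases.reverse) := by
  unfold pvAEntry
  rw [← Option.or_none (o := pvBFind (pvFirstByUpper cols) aliases.reverse),
      ← pv_alias_loop cols aliases none]
  generalize (none : Option String) = acc
  induction aliases generalizing acc with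
  | nil => simp
  | cons p rest ih =>
      simp only [List.foldl_cons]
      have : (if cols ≠ [] then
          match pvAColLoop cols p with
          | some c => (d.insert k acc).insert k (some c)
          | none => d.insert k acc
          else d.insert k acc)
          = d.insert k (if cols ≠ [] then
              match pvAColLoop cols p with
              | some c => some c
              | none => acc
              else acc) := by
        split_ifs with hc
        · cases pvAColLoop cols p <;>
            simp [PySem.Dict.insert_insert_self]
        · rfl
      rw [this, ih]

-- ===== VERDICT (by name: the statement is the Claim_ definition above) =====
theorem get_needed_columns_spec : Claim_equal_get_needed_columns := by
  intro database_columns database_type _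
  unfold Spec_get_needed_columns get_needed_columns get_needed_columns_alt
  cases pvTable database_type with
  | none => rfl
  | some needed =>
      simp only []
      congr 1
      apply PySem.List.foldl_congr_mem
      intro d kv _
      exact pv_entry_eq database_columns kv.1 kv.2 d
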